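-- pv_equiv track=rewrite | github.com/Waftero/avd-code-reddit | advent-code/es14.py | caratteri_ripetuti
-- ===== SOURCE A (Python) =====
-- def caratteri_ripetuti(stringa):
--     ripetizioni = []
--     caratteri_esaminati = set()
--
--     for char in stringa:
--         if char not in caratteri_esaminati:
--             if char != 'J':
--                 # Controlla quante volte il carattere si ripete
--                 conteggio = conta_carattere_ripetuto(stringa, char)
--
--                 # Se si ripete più di una volta, aggiungilo alla lista
--                 if conteggio > 1:
--                     ripetizioni.append(conteggio)
--
--             caratteri_esaminati.add(char)
--     ripetizioni.append(conta_carattere_ripetuto(stringa, 'J'))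
--     return ripetizioni
--
-- def conta_carattere_ripetuto(stringa, carattere):
--     conteggio = 0
--     for char in stringa:
--         if char == carattere:
--             conteggio += 1
--     return conteggio
-- ===== SOURCE B (Python) =====
-- def caratteri_ripetuti(stringa):
--     counts = {}
--     for char in stringa:
--         counts[char] = counts.get(char, 0) + 1
--     ripetizioni = [v for k, v in counts.items() if k != 'J' and v > 1]
--     ripetizioni.append(counts.get('J', 0))
--     return ripetizioni
-- ===== Notes on version B (the rewrite author's own statement) =====
-- stated objective: faster
-- what changed: Replaces the seen-set plus a full re-scan of the string per distinct character by a single counting pass building a dict, then one loop over the dict's items (insertion order = first-appearance order).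
import Mathlib
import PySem

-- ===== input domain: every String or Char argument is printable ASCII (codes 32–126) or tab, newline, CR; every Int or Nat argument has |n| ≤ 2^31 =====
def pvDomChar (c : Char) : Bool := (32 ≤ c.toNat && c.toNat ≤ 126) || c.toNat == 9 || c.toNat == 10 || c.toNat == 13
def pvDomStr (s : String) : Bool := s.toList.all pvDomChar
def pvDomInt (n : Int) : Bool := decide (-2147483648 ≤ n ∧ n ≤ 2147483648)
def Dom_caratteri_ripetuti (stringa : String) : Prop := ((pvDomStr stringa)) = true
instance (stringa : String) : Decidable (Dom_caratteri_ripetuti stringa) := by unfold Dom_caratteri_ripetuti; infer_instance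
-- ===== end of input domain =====

-- B replaces A's seen-set + per-character re-scan of the string by one counting pass
-- building a dict, then a single loop over its items (insertion order = first-appearance order).

-- ===== PORT A =====
def conta_carattere_ripetuto (stringa : String) (carattere : Char) : Int :=
  stringa.toList.foldl (fun conteggio ch => if ch == carattere then conteggio + 1 else conteggio) 0

-- one iteration of A's for-loop over (ripetizioni, caratteri_esaminati)
def aStep (stringa : String) (s : List Int × PySem.Set Char) (char : Char) : List Int × PySem.Set Char :=
  if PySem.Set.contains s.2 char then s
  else if char ≠ 'J' then
    let conteggio := conta_carattere_ripetuto stringa char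
    (if conteggio > 1 then s.1 ++ [conteggio] else s.1, PySem.Set.add s.2 char)
  else (s.1, PySem.Set.add s.2 char)

def caratteri_ripetuti (stringa : String) : List Int :=
  let st := stringa.toList.foldl (aStep stringa) ([], PySem.Set.empty)
  st.1 ++ [conta_carattere_ripetuto stringa 'J']

-- ===== PORT B =====
def caratteri_ripetuti_alt (stringa : String) : List Int :=
  let counts : PySem.Dict Char Int :=
    stringa.toList.foldl (fun d char => d.insert char (d.getD char 0 + 1)) PySem.Dict.empty
  (counts.items.filterMap (fun kv => if kv.1 ≠ 'J' ∧ kv.2 > 1 then some kv.2 else none))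
    ++ [counts.getD 'J' 0]

-- ===== PRECONDITION & SPEC =====
def Spec_caratteri_ripetuti (stringa : String) (out : List Int) : Prop := out = caratteri_ripetuti_alt stringa
instance (stringa : String) (out : List Int) : Decidable (Spec_caratteri_ripetuti stringa out) := by unfold Spec_caratteri_ripetuti; infer_instance

-- ===== CLAIM (what is proved, stated in full; the proofs are below) =====
def Claim_equal_caratteri_ripetuti : Prop := ∀ (stringa : String), Dom_caratteri_ripetuti stringa → Spec_caratteri_ripetuti stringa (caratteri_ripetuti stringa)

-- ===== LEMMAS AND PROOFS =====

-- conta_carattere_ripetuto is the count of the character in the string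
theorem conta_eq_count (stringa : String) (c : Char) :
    conta_carattere_ripetuto stringa c = (stringa.toList.count c : Int) := by
  unfold conta_carattere_ripetuto
  rw [PySem.List.foldl_beq_add_one]
  simp

theorem aStep_of_mem (stringa : String) (acc : List Int) (seen : PySem.Set Char) (c : Char)
    (hc : c ∈ seen) : aStep stringa (acc, seen) c = (acc, seen) := by
  simp [aStep, hc]

theorem aStep_of_not_mem (stringa : String) (acc : List Int) (seen : PySem.Set Char) (c : Char)
    (hc : c ∉ seen) :
    aStep stringa (acc, seen) c
      = (acc ++ (if c ≠ 'J' ∧ conta_carattere_ripetuto stringa c > 1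
                  then [conta_carattere_ripetuto stringa c] else []),
          PySem.Set.add seen c) := by
  by_cases hJ : c = 'J'
  · subst hJ
    simp [aStep, hc]
  · by_cases hg : conta_carattere_ripetuto stringa c > 1
    · simp [aStep, hJ, hg]
      exact hc
    · simp [aStep, hJ, hg]
      exact fun h' => absurd h' hc

-- the values appended on the yet-unseen characters of l, with a fixed count function
def newCounts (cnt : Char → Int) : List Char → PySem.Set Char → List Int
  | [], _ => []
  | c :: l, seen =>
      if c ∈ seen then newCounts cnt l seen
      else (if c ≠ 'J' ∧ cnt c > 1 then [cnt c] else []) ++ newCounts cnt l (PySem.Set.add seen c)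

theorem loopA (stringa : String) (l : List Char) (acc : List Int) (seen : PySem.Set Char) :
    (l.foldl (aStep stringa) (acc, seen)).1
    = acc ++ newCounts (fun c => conta_carattere_ripetuto stringa c) l seen := by
  induction l generalizing acc seen with
  | nil => simp [newCounts]
  | cons c l ih =>
    rw [List.foldl_cons, newCounts]
    by_cases hc : c ∈ seen
    · rw [aStep_of_mem stringa acc seen c hc, ih]
      simp [hc]
    · rw [aStep_of_not_mem stringa acc seen c hc, ih]
      simp [hc, List.append_assoc]

theorem filterMap_foldl_add (cnt : Char → Int) (l : List Char) (seen : PySem.Set Char) :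
    (l.foldl PySem.Set.add seen).filterMap
        (fun c => if c ≠ 'J' ∧ cnt c > 1 then some (cnt c) else none)
    = seen.filterMap (fun c => if c ≠ 'J' ∧ cnt c > 1 then some (cnt c) else none)
        ++ newCounts cnt l seen := by
  induction l generalizing seen with
  | nil => simp [newCounts]
  | cons c l ih =>
    rw [List.foldl_cons, newCounts]
    by_cases hc : c ∈ seen
    · rw [PySem.Set.add_of_mem hc, ih]
      simp [hc]
    · rw [PySem.Set.add_of_not_mem hc, ih, List.filterMap_append]
      by_cases h : c ≠ 'J' ∧ cnt c > 1
      · simp [hc, h]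
      · simp [hc, h]

-- ===== VERDICT (by name: the statement is the Claim_ definition above) =====
theorem caratteri_ripetuti_spec : Claim_equal_caratteri_ripetuti := by
  intro stringa _
  unfold Spec_caratteri_ripetuti
  simp only [caratteri_ripetuti, caratteri_ripetuti_alt]
  rw [loopA, PySem.Dict.foldl_insert_getD_add_one_eq_counter,
    PySem.Dict.items_counter, PySem.Dict.getD_counter]
  simp only [List.filterMap_map, Function.comp, List.nil_append]
  rw [PySem.Set.ofList_eq_foldl,
    filterMap_foldl_add (fun c => ((stringa.toList.count c : Nat) : Int)) stringa.toList []]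
  simp [conta_eq_count, PySem.Set.empty]
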